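-- pv_equiv track=rewrite | github.com/jtxiao82/pulpino | sw/script/genfault/genFaultList.py | runtime
-- ===== SOURCE A (Python) =====
-- def runtime(time_arr):
--   total_run_time = 0
--   ffs_run_time   = time_arr[0]
--   fs_run_time    = 0
--
--   for i in range(0, len(time_arr), 1):
--     total_run_time += time_arr[i]
--   for i in range(1, len(time_arr), 1):
--     fs_run_time    += time_arr[i]
--   return total_run_time, ffs_run_time, fs_run_time
-- ===== SOURCE B (Python) =====
-- def runtime(time_arr):
--     ffs_run_time = time_arr[0]
--     fs_run_time = sum(time_arr[1:])
--     return ffs_run_time + fs_run_time, ffs_run_time, fs_run_time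
-- ===== Notes on version B (the rewrite author's own statement) =====
-- stated objective: simpler
-- what changed: B sums only the elements after the first and derives the total arithmetically as first + rest, replacing A's two independent full index loops with one partial sum.
import Mathlib
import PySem

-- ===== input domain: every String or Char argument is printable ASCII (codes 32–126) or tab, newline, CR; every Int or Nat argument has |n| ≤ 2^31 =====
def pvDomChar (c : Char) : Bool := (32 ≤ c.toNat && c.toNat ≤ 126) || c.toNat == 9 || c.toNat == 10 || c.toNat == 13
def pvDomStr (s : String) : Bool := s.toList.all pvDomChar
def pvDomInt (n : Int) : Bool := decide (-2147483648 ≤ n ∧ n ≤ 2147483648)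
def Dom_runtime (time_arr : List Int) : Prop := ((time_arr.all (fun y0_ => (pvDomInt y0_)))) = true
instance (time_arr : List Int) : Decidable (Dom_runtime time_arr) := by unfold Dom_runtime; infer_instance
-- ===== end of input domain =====

-- B replaces A's two full index loops by one partial sum plus the derivation total = first + rest (simpler decomposition; return value only).
-- ===== PORT A =====
def runtime (time_arr : List Int) : Int × Int × Int :=
  let total_run_time : Int := 0
  let ffs_run_time : Int := PySem.List.pyGetD time_arr 0 0
  let fs_run_time : Int := 0
  let total_run_time :=
    (PySem.List.pyRange 0 (time_arr.length : Int) 1).foldl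
      (fun acc i => acc + PySem.List.pyGetD time_arr i 0) total_run_time
  let fs_run_time :=
    (PySem.List.pyRange 1 (time_arr.length : Int) 1).foldl
      (fun acc i => acc + PySem.List.pyGetD time_arr i 0) fs_run_time
  (total_run_time, ffs_run_time, fs_run_time)

-- ===== PORT B =====
def runtime_alt (time_arr : List Int) : Int × Int × Int :=
  let ffs_run_time : Int := PySem.List.pyGetD time_arr 0 0
  let fs_run_time : Int := (PySem.List.slice time_arr (some 1) none).sum
  (ffs_run_time + fs_run_time, ffs_run_time, fs_run_time)

-- ===== PRECONDITION & SPEC =====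
-- A (and B) raise IndexError on the empty list (time_arr[0]); Pre_ excludes exactly that input.
def Pre_runtime (time_arr : List Int) : Prop := time_arr ≠ []
instance (time_arr : List Int) : Decidable (Pre_runtime time_arr) := by unfold Pre_runtime; infer_instance
def pvWitness_runtime : List Int := [3, -1, 4]
def Spec_runtime (time_arr : List Int) (out : Int × Int × Int) : Prop := out = runtime_alt time_arr
instance (time_arr : List Int) (out : Int × Int × Int) : Decidable (Spec_runtime time_arr out) := by unfold Spec_runtime; infer_instance

-- ===== CLAIM (what is proved, stated in full; the proofs are below) =====
def Claim_equal_runtime : Prop := ∀ (time_arr : List Int), Dom_runtime time_arr → Pre_runtime time_arr → Spec_runtime time_arr (runtime time_arr)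

-- ===== LEMMAS AND PROOFS =====

-- ===== VERDICT (by name: the statement is the Claim_ definition above) =====
theorem runtime_spec : Claim_equal_runtime := by
  intro time_arr _ hpre
  obtain ⟨x, t, rfl⟩ := List.exists_cons_of_ne_nil hpre
  unfold Spec_runtime runtime runtime_alt
  dsimp only
  rw [PySem.List.foldl_pyRange_zero_pyGetD' (x :: t) 0 (fun acc v => acc + v) 0,
      PySem.List.foldl_pyRange_pyGetD' (x :: t) 0 (fun acc v => acc + v) 0 (a := 1) (by norm_num),
      PySem.List.slice_from_one]
  rw [PySem.List.foldl_add (x :: t) (fun v => v) 0]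
  simp only [Int.toNat_one, List.drop_one, List.tail_cons]
  rw [PySem.List.foldl_add t (fun v => v) 0]
  simp
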